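-- pv_equiv track=rewrite | github.com/verivital/behaverify | src/smv_writer.py | create_node_to_local_root_map
-- ===== SOURCE A (Python) =====
-- def create_node_to_local_root_map(nodes, parallel_synch_set, parallel_unsynch_set, decorator_set, leaf_set):
--     node_to_local_root_map = {0: 0}# a map from node_id to the local root for that node_id
--     #local_roots = {0}
--     for node_id in range(1, len(nodes)):
--         if nodes[node_id][1] in parallel_unsynch_set or nodes[node_id][1] in parallel_synch_set:
--             node_to_local_root_map[node_id] = node_id
--             #local_roots.add(node_id)
--         else:
--             node_to_local_root_map[node_id] = node_to_local_root_map[nodes[node_id][1]]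
--     #return (node_to_local_root_map, local_roots)
--     return node_to_local_root_map
-- ===== SOURCE B (Python) =====
-- def create_node_to_local_root_map(nodes, parallel_synch_set, parallel_unsynch_set, decorator_set, leaf_set):
--     # Each node's local root is found independently by walking up the parent
--     # chain until a node whose parent is a parallel node (or node 0) is reached.
--     def root(x):
--         if x == 0:
--             return 0
--         parent = nodes[x][1]
--         if parent in parallel_unsynch_set or parent in parallel_synch_set:
--             return x
--         return root(parent)
--
--     return {0: 0, **{i: root(i) for i in range(1, len(nodes))}}
-- ===== Notes on version B (the rewrite author's own statement) =====
-- stated objective: alternative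
-- what changed: Instead of A's single forward accumulation into a dict (each node copies its parent's already-stored root), B computes each node's root independently with a pure recursive parent-chain walk (stopping at node 0 or at a parallel parent) and assembles the result as {0:0} merged with a dict comprehension over range(1, len(nodes)).
import Mathlib
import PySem

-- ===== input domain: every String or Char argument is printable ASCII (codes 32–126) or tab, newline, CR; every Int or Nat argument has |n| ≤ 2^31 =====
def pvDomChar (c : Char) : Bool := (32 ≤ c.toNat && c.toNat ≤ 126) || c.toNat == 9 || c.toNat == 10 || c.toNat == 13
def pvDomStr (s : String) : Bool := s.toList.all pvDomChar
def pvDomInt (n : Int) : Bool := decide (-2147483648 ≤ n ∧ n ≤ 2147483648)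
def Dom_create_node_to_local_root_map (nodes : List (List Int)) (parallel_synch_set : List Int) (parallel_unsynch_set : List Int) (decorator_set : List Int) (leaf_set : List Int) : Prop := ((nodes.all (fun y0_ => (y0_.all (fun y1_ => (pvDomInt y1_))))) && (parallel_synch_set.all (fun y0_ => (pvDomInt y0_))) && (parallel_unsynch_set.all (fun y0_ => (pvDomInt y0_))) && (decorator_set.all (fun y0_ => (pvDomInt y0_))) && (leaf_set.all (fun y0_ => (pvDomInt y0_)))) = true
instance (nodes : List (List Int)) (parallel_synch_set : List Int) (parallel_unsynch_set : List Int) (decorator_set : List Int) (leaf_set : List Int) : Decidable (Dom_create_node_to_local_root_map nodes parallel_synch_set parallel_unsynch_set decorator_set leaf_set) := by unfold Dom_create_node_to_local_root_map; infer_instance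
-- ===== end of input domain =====

-- B replaces A's forward dict accumulation by an independent pure parent-chain walk per node,
-- assembling the map directly as {0:0} plus a comprehension (alternative decomposition).

-- ===== PORT A =====
-- one loop iteration of A: p = nodes[node_id][1]; parallel ⇒ own root, else copy parent's stored root
def pvStepA (nodes : List (List Int)) (parallel_synch_set : List Int) (parallel_unsynch_set : List Int)
    (m : PySem.Dict Int Int) (node_id : Int) : PySem.Dict Int Int :=
  let p := PySem.List.pyGetD (PySem.List.pyGetD nodes node_id []) 1 0
  if p ∈ parallel_unsynch_set ∨ p ∈ parallel_synch_set then
    m.insert node_id node_id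
  else
    m.insert node_id (m.getD p 0)   -- m[p] exists under Pre_ (KeyError otherwise)

def create_node_to_local_root_map (nodes : List (List Int)) (parallel_synch_set : List Int) (parallel_unsynch_set : List Int) (decorator_set : List Int) (leaf_set : List Int) : List (Int × Int) :=
  ((PySem.List.pyRange 1 (nodes.length : Int) 1).foldl
      (pvStepA nodes parallel_synch_set parallel_unsynch_set)
      ((PySem.Dict.empty).insert 0 0)).items

-- ===== PORT B =====
-- Source B's root(x): pure walk up the parent chain, stopping at node 0 or at a parallel parent.
-- Fuel only makes the recursion total; under Pre_ the chain is strictly decreasing so fuel is never exhausted.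
def pvRootB (nodes : List (List Int)) (parallel_synch_set : List Int) (parallel_unsynch_set : List Int)
    (x : Int) : Nat → Int
  | 0 => x
  | fuel + 1 =>
    if x = 0 then 0
    else
      let parent := PySem.List.pyGetD (PySem.List.pyGetD nodes x []) 1 0
      if parent ∈ parallel_unsynch_set ∨ parent ∈ parallel_synch_set then x
      else pvRootB nodes parallel_synch_set parallel_unsynch_set parent fuel

-- {0: 0, **{i: root(i) for i in range(1, len(nodes))}} — keys 0,1,…,n-1 in order, so the
-- dict's items are literally this cons/map list.
def create_node_to_local_root_map_alt (nodes : List (List Int)) (parallel_synch_set : List Int) (parallel_unsynch_set : List Int) (decorator_set : List Int) (leaf_set : List Int) : List (Int × Int) :=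
  ((0 : Int), (0 : Int)) ::
    (PySem.List.pyRange 1 (nodes.length : Int) 1).map
      (fun i => (i, pvRootB nodes parallel_synch_set parallel_unsynch_set i nodes.length))

-- ===== PRECONDITION & SPEC =====
-- Pre_ excludes exactly the inputs where A raises: a node row with fewer than 2 entries (IndexError on nodes[i][1]),
-- or a non-parallel parent reference outside 0..i-1 (KeyError on node_to_local_root_map[nodes[i][1]]).
def Pre_create_node_to_local_root_map (nodes : List (List Int)) (parallel_synch_set : List Int) (parallel_unsynch_set : List Int) (decorator_set : List Int) (leaf_set : List Int) : Prop :=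
  ∀ i : Nat, i < nodes.length → 1 ≤ i →
    2 ≤ (nodes.getD i []).length ∧
    ((nodes.getD i []).getD 1 0 ∈ parallel_unsynch_set ∨
     (nodes.getD i []).getD 1 0 ∈ parallel_synch_set ∨
     (0 ≤ (nodes.getD i []).getD 1 0 ∧ (nodes.getD i []).getD 1 0 < (i : Int)))
instance (nodes : List (List Int)) (parallel_synch_set : List Int) (parallel_unsynch_set : List Int) (decorator_set : List Int) (leaf_set : List Int) : Decidable (Pre_create_node_to_local_root_map nodes parallel_synch_set parallel_unsynch_set decorator_set leaf_set) := by unfold Pre_create_node_to_local_root_map; infer_instance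

def pvWitness_create_node_to_local_root_map : List (List Int) × List Int × List Int × List Int × List Int :=
  ([[5, 0], [5, 0], [3, 1], [4, 2]], [1], [], [3], [4])

def Spec_create_node_to_local_root_map (nodes : List (List Int)) (parallel_synch_set : List Int) (parallel_unsynch_set : List Int) (decorator_set : List Int) (leaf_set : List Int) (out : List (Int × Int)) : Prop := out = create_node_to_local_root_map_alt nodes parallel_synch_set parallel_unsynch_set decorator_set leaf_set
instance (nodes : List (List Int)) (parallel_synch_set : List Int) (parallel_unsynch_set : List Int) (decorator_set : List Int) (leaf_set : List Int) (out : List (Int × Int)) : Decidable (Spec_create_node_to_local_root_map nodes parallel_synch_set parallel_unsynch_set decorator_set leaf_set out) := by unfold Spec_create_node_to_local_root_map; infer_instance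

-- ===== CLAIM (what is proved, stated in full; the proofs are below) =====
def Claim_equal_create_node_to_local_root_map : Prop := ∀ (nodes : List (List Int)) (parallel_synch_set : List Int) (parallel_unsynch_set : List Int) (decorator_set : List Int) (leaf_set : List Int), Dom_create_node_to_local_root_map nodes parallel_synch_set parallel_unsynch_set decorator_set leaf_set → Pre_create_node_to_local_root_map nodes parallel_synch_set parallel_unsynch_set decorator_set leaf_set → Spec_create_node_to_local_root_map nodes parallel_synch_set parallel_unsynch_set decorator_set leaf_set (create_node_to_local_root_map nodes parallel_synch_set parallel_unsynch_set decorator_set leaf_set)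

-- ===== LEMMAS AND PROOFS =====

-- the port's parent expression coincides with Pre_'s getD form (given the row exists and has ≥ 2 entries)
theorem pv_parent_eq (nodes : List (List Int)) (i : Nat) (hi : i < nodes.length)
    (hlen : 2 ≤ (nodes.getD i []).length) :
    PySem.List.pyGetD (PySem.List.pyGetD nodes (i : Int) []) 1 0
      = (nodes.getD i []).getD 1 0 := by
  have h1lt' : 1 < nodes[i].length := by
    have h := hlen
    simp [List.getD_eq_getElem?_getD, List.getElem?_eq_getElem hi] at h
    omega
  simp [PySem.List.pyGetD, PySem.List.pyGet?, PySem.List.pyIdx?, hi, h1lt',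
    List.getD_eq_getElem?_getD, List.getElem?_eq_getElem hi,
    List.getElem?_eq_getElem h1lt']

-- under Pre_, pvRootB does not depend on the fuel as long as it exceeds x
theorem pv_rootB_fuel (nodes : List (List Int)) (parallel_synch_set parallel_unsynch_set : List Int)
    (hpre : ∀ i : Nat, i < nodes.length → 1 ≤ i →
      2 ≤ (nodes.getD i []).length ∧
      ((nodes.getD i []).getD 1 0 ∈ parallel_unsynch_set ∨
       (nodes.getD i []).getD 1 0 ∈ parallel_synch_set ∨
       (0 ≤ (nodes.getD i []).getD 1 0 ∧ (nodes.getD i []).getD 1 0 < (i : Int)))) :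
    ∀ k : Nat, ∀ x : Int, x.toNat ≤ k → 0 ≤ x → x < (nodes.length : Int) →
      ∀ f g : Nat, x.toNat < f → x.toNat < g →
        pvRootB nodes parallel_synch_set parallel_unsynch_set x f
          = pvRootB nodes parallel_synch_set parallel_unsynch_set x g := by
  intro k
  induction k with
  | zero =>
    intro x hxk hx0 _ f g hf hg
    have hx : x = 0 := by omega
    obtain ⟨f', rfl⟩ : ∃ f', f = f' + 1 := ⟨f - 1, by omega⟩
    obtain ⟨g', rfl⟩ : ∃ g', g = g' + 1 := ⟨g - 1, by omega⟩
    simp [pvRootB, hx]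
  | succ k ih =>
    intro x hxk hx0 hxlen f g hf hg
    obtain ⟨f', rfl⟩ : ∃ f', f = f' + 1 := ⟨f - 1, by omega⟩
    obtain ⟨g', rfl⟩ : ∃ g', g = g' + 1 := ⟨g - 1, by omega⟩
    by_cases hx : x = 0
    · simp [pvRootB, hx]
    · have hx1 : 1 ≤ x := by omega
      have hxi : x = ((x.toNat : Nat) : Int) := by omega
      have hilen : x.toNat < nodes.length := by omega
      obtain ⟨hlen, hcases⟩ := hpre x.toNat hilen (by omega)
      have hpe : PySem.List.pyGetD (PySem.List.pyGetD nodes x []) 1 0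
          = (nodes.getD x.toNat []).getD 1 0 := by
        rw [hxi]; exact pv_parent_eq nodes x.toNat hilen hlen
      simp only [pvRootB, if_neg hx, hpe]
      simp only [List.getD_eq_getElem?_getD] at hcases ⊢
      by_cases hp : (nodes[x.toNat]?.getD [])[1]?.getD 0 ∈ parallel_unsynch_set ∨
          (nodes[x.toNat]?.getD [])[1]?.getD 0 ∈ parallel_synch_set
      · rw [if_pos hp, if_pos hp]
      · rw [if_neg hp, if_neg hp]
        obtain ⟨hp0, hplt⟩ := (hcases.resolve_left (fun h => hp (Or.inl h))).resolve_left
          (fun h => hp (Or.inr h))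
        exact ih _ (by omega) hp0 (by omega) f' g' (by omega) (by omega)

-- A's fold: its items list is B's cons/map list, and its lookups are characterised
theorem pv_loop_eq (nodes : List (List Int)) (parallel_synch_set parallel_unsynch_set : List Int)
    (hpre : ∀ i : Nat, i < nodes.length → 1 ≤ i →
      2 ≤ (nodes.getD i []).length ∧
      ((nodes.getD i []).getD 1 0 ∈ parallel_unsynch_set ∨
       (nodes.getD i []).getD 1 0 ∈ parallel_synch_set ∨
       (0 ≤ (nodes.getD i []).getD 1 0 ∧ (nodes.getD i []).getD 1 0 < (i : Int)))) :
    ∀ n : Nat, n ≤ nodes.length →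
      (((PySem.List.pyRange 1 (n : Int) 1).foldl
          (pvStepA nodes parallel_synch_set parallel_unsynch_set)
          ((PySem.Dict.empty).insert 0 0)).items
        = ((0 : Int), (0 : Int)) ::
            (PySem.List.pyRange 1 (n : Int) 1).map
              (fun i => (i, pvRootB nodes parallel_synch_set parallel_unsynch_set i nodes.length)))
      ∧ ∀ j : Int,
          ((PySem.List.pyRange 1 (n : Int) 1).foldl
              (pvStepA nodes parallel_synch_set parallel_unsynch_set)
              ((PySem.Dict.empty).insert 0 0)).get? j
            = (if j = 0 ∨ (1 ≤ j ∧ j < (n : Int))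
                then some (pvRootB nodes parallel_synch_set parallel_unsynch_set j nodes.length)
                else none) := by
  intro n
  induction n with
  | zero =>
    intro _
    have hnil : PySem.List.pyRange 1 ((0 : Nat) : Int) 1 = [] := by
      apply PySem.List.pyRange_one_eq_nil; norm_num
    rw [hnil]
    refine ⟨?_, fun j => ?_⟩
    · simp [PySem.Dict.items_insert_of_not_contains, PySem.Dict.empty]
    · rw [List.foldl_nil, PySem.Dict.get?_insert]
      by_cases h : j = 0
      · subst h
        have : pvRootB nodes parallel_synch_set parallel_unsynch_set 0 nodes.length = 0 := by
          cases nodes.length <;> simp [pvRootB]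
        simp [this]
      · simp [h, PySem.Dict.get?_empty]
        omega
  | succ n ih =>
    intro hlt
    have hn : n ≤ nodes.length := Nat.le_of_succ_le hlt
    obtain ⟨heq, hinv⟩ := ih hn
    rcases Nat.eq_zero_or_pos n with hn0 | hn1
    · subst hn0
      have hnil : PySem.List.pyRange 1 ((0 + 1 : Nat) : Int) 1 = [] := by
        apply PySem.List.pyRange_one_eq_nil; norm_num
      rw [hnil]
      have hnil0 : PySem.List.pyRange 1 ((0 : Nat) : Int) 1 = [] := by
        apply PySem.List.pyRange_one_eq_nil; norm_num
      rw [hnil0] at heq hinv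
      refine ⟨heq, fun j => ?_⟩
      rw [hinv j]
      have : (j = 0 ∨ 1 ≤ j ∧ j < ((0 : Nat) : Int)) ↔ (j = 0 ∨ 1 ≤ j ∧ j < ((0 + 1 : Nat) : Int)) := by
        push_cast; omega
      simp only [this]
    · have hsplit : PySem.List.pyRange 1 ((n + 1 : Nat) : Int) 1
          = PySem.List.pyRange 1 (n : Int) 1 ++ [(n : Int)] := by
        push_cast
        apply PySem.List.pyRange_one_succ_right
        exact_mod_cast hn1
      rw [hsplit, List.foldl_append, List.foldl_cons, List.foldl_nil, List.map_append]
      set mA := (PySem.List.pyRange 1 (n : Int) 1).foldl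
          (pvStepA nodes parallel_synch_set parallel_unsynch_set)
          ((PySem.Dict.empty).insert 0 0) with hmA
      have hgetn : mA.get? (n : Int) = none := by
        rw [hinv, if_neg (by omega : ¬ ((n : Int) = 0 ∨ 1 ≤ (n : Int) ∧ (n : Int) < (n : Int)))]
      obtain ⟨hlen, hcases⟩ := hpre n hlt hn1
      have hpe : PySem.List.pyGetD (PySem.List.pyGetD nodes (n : Int) []) 1 0
          = (nodes.getD n []).getD 1 0 := pv_parent_eq nodes n (by omega) hlen
      set p : Int := (nodes.getD n []).getD 1 0 with hpv
      -- the value A stores at n equals B's pvRootB n nodes.length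
      have hF : ∃ f, nodes.length = f + 1 := ⟨nodes.length - 1, by omega⟩
      obtain ⟨f, hfeq⟩ := hF
      have hrootn : pvRootB nodes parallel_synch_set parallel_unsynch_set (n : Int) nodes.length
          = (if p ∈ parallel_unsynch_set ∨ p ∈ parallel_synch_set then (n : Int)
             else pvRootB nodes parallel_synch_set parallel_unsynch_set p nodes.length) := by
        rw [hfeq]
        simp only [pvRootB, hpe]
        rw [if_neg (by omega : ¬ ((n : Int) = 0))]
        by_cases hp : p ∈ parallel_unsynch_set ∨ p ∈ parallel_synch_set
        · simp [hp]
        · rw [if_neg hp, if_neg hp]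
          obtain ⟨hp0, hplt⟩ : 0 ≤ p ∧ p < (n : Int) := by tauto
          exact pv_rootB_fuel nodes parallel_synch_set parallel_unsynch_set hpre
            p.toNat p le_rfl hp0 (by omega) f (f + 1) (by omega) (by omega)
      have hstep : pvStepA nodes parallel_synch_set parallel_unsynch_set mA (n : Int)
          = mA.insert (n : Int)
              (pvRootB nodes parallel_synch_set parallel_unsynch_set (n : Int) nodes.length) := by
        simp only [pvStepA, hpe, hrootn]
        by_cases hp : p ∈ parallel_unsynch_set ∨ p ∈ parallel_synch_set
        · rw [if_pos hp, if_pos hp]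
        · rw [if_neg hp, if_neg hp]
          obtain ⟨hp0, hplt⟩ : 0 ≤ p ∧ p < (n : Int) := by tauto
          have hgp : mA.get? p
              = some (pvRootB nodes parallel_synch_set parallel_unsynch_set p nodes.length) := by
            rw [hinv]
            have : p = 0 ∨ 1 ≤ p ∧ p < (n : Int) := by omega
            simp [this]
          rw [PySem.Dict.getD_eq_get?_getD, hgp, Option.getD_some]
      rw [hstep]
      constructor
      · rw [PySem.Dict.items_insert_of_not_contains, heq]
        · simp
        · rw [PySem.Dict.contains_eq_isSome_get?, hgetn]; rfl
      · intro j
        rw [PySem.Dict.get?_insert]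
        by_cases hj : j = (n : Int)
        · subst hj; simp
        · rw [if_neg hj, hinv j]
          have : (j = 0 ∨ 1 ≤ j ∧ j < (n : Int)) ↔ (j = 0 ∨ 1 ≤ j ∧ j < ((n + 1 : Nat) : Int)) := by
            push_cast; omega
          simp only [this]

-- ===== VERDICT (by name: the statement is the Claim_ definition above) =====
theorem create_node_to_local_root_map_spec : Claim_equal_create_node_to_local_root_map := by
  intro nodes parallel_synch_set parallel_unsynch_set decorator_set leaf_set _ hpre
  unfold Spec_create_node_to_local_root_map create_node_to_local_root_map
    create_node_to_local_root_map_alt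
  exact (pv_loop_eq nodes parallel_synch_set parallel_unsynch_set hpre nodes.length le_rfl).1
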